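-- pv_equiv track=rewrite | github.com/ethicalrushi/cp | testgen/generate.py | solve
-- ===== SOURCE A (Python) =====
-- def solve(arr):
--     mod = 10**9+7
--     aset = set(arr)
--     res =0
--     res_count = 0
--     for a in arr:
--         if a-1 not in aset:
--             s=0
--             count=0
--             while a in aset:
--                 s+=a
--                 a+=1
--                 count+=1
--             res = max(res, s)
--             res_count = max(res_count, count)
--     return res%mod
-- ===== SOURCE B (Python) =====
-- def solve(arr):
--     mod = 10**9 + 7
--     best = 0
--     cur = 0
--     prev = None
--     for v in sorted(set(arr)):
--         if prev is not None and v == prev + 1: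
--             cur += v
--         else:
--             best = max(best, cur)
--             cur = v
--         prev = v
--     best = max(best, cur)
--     return best % mod
-- ===== Notes on version B (the rewrite author's own statement) =====
-- stated objective: alternative
-- what changed: Replaces per-start upward hash-set probing (re-walked for every duplicate occurrence of a run start) with a single linear sweep over the sorted unique values that closes a run at each gap.
import Mathlib
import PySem

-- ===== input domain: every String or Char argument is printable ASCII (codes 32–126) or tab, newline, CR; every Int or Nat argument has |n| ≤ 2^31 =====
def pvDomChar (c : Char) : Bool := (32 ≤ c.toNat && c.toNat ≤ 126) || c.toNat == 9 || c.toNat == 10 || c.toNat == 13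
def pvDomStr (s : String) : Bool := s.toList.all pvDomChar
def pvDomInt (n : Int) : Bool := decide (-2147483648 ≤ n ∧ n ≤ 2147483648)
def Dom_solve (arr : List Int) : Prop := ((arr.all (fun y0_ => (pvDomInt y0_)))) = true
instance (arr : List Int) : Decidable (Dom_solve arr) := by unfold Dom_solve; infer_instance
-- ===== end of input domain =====

-- B replaces A's per-start upward set probing (re-walked for each duplicate occurrence of a
-- run start) with a single sweep over the sorted unique values that closes a run at each gap
-- (objective: alternative algorithm of similar cost).

-- ===== PORT A =====
-- termination helpers for the 'while a in aset' loop (cited by name in decreasing_by)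
theorem pvFilterLe (p q : Int → Bool) (h : ∀ x, p x = true → q x = true) (S : List Int) :
    (S.filter p).length ≤ (S.filter q).length := by
  induction S with
  | nil => simp
  | cons b T ih =>
    by_cases hp : p b = true
    · simp [hp, h b hp]; omega
    · by_cases hq : q b = true <;> simp [hp, hq] <;> omega

theorem pvFilterDec (S : List Int) (a : Int) (h : a ∈ S) :
    (S.filter (fun x => decide (a + 1 ≤ x))).length < (S.filter (fun x => decide (a ≤ x))).length := by
  induction S with
  | nil => simp at h
  | cons b T ih =>
    have hle : (T.filter (fun x => decide (a + 1 ≤ x))).length ≤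
        (T.filter (fun x => decide (a ≤ x))).length :=
      pvFilterLe _ _ (by intro x hx; simp at hx ⊢; omega) T
    rcases List.mem_cons.mp h with hb | hT
    · subst hb
      rw [List.filter_cons, List.filter_cons,
        if_neg (by simp only [decide_eq_true_eq]; omega),
        if_pos (by simp only [decide_eq_true_eq]; omega)]
      simp only [List.length_cons]
      omega
    · have := ih hT
      rw [List.filter_cons, List.filter_cons]
      by_cases h1 : (a + 1 : Int) ≤ b
      · rw [if_pos (by simpa using h1), if_pos (by simp only [decide_eq_true_eq]; omega)]
        simp only [List.length_cons]
        omega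
      · rw [if_neg (by simpa using h1)]
        by_cases h2 : a ≤ b
        · rw [if_pos (by simpa using h2)]
          simp only [List.length_cons]
          omega
        · rw [if_neg (by simpa using h2)]
          omega

-- while a in aset: s += a; a += 1; count += 1   (returns final (s, count))
def pvWhileA (S : List Int) (a s count : Int) : Int × Int :=
  if h : a ∈ S then pvWhileA S (a + 1) (s + a) (count + 1) else (s, count)
termination_by (S.filter (fun x => decide (a ≤ x))).length
decreasing_by exact pvFilterDec S a h

-- one iteration of A's 'for a in arr' loop over the state (res, res_count)
def pvStepA (S : List Int) (rc : Int × Int) (a : Int) : Int × Int :=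
  if a - 1 ∈ S then rc
  else
    let sc := pvWhileA S a 0 0
    (max rc.1 sc.1, max rc.2 sc.2)

def solve (arr : List Int) : Int :=
  let m : Int := 10 ^ 9 + 7
  let aset := PySem.Set.ofList arr
  let r := arr.foldl (pvStepA aset) (0, 0)
  PySem.Int.mod r.1 m

-- ===== PORT B =====
-- one iteration of B's loop over the state (best, cur, prev)
def pvStepB (st : Int × Int × Option Int) (v : Int) : Int × Int × Option Int :=
  match st with
  | (best, cur, some p) =>
      if v = p + 1 then (best, cur + v, some v) else (max best cur, v, some v)
  | (best, cur, none) => (max best cur, v, some v)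

def solve_alt (arr : List Int) : Int :=
  let m : Int := 10 ^ 9 + 7
  let u := PySem.List.sorted (PySem.Set.ofList arr) (fun x => x) false
  let st := u.foldl pvStepB (0, 0, none)
  PySem.Int.mod (max st.1 st.2.1) m

-- ===== PRECONDITION & SPEC =====
def Spec_solve (arr : List Int) (out : Int) : Prop := out = solve_alt arr
instance (arr : List Int) (out : Int) : Decidable (Spec_solve arr out) := by unfold Spec_solve; infer_instance

-- ===== CLAIM (what is proved, stated in full; the proofs are below) =====
def Claim_equal_solve : Prop := ∀ (arr : List Int), Dom_solve arr → Spec_solve arr (solve arr)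

-- ===== LEMMAS AND PROOFS =====

-- sum of the consecutive chain a, a+1, … as long as it stays in S
def pvSumFrom (S : List Int) (a : Int) : Int :=
  if h : a ∈ S then a + pvSumFrom S (a + 1) else 0
termination_by (S.filter (fun x => decide (a ≤ x))).length
decreasing_by exact pvFilterDec S a h

theorem pvWhileA_fst (S : List Int) (a s c : Int) :
    (pvWhileA S a s c).1 = s + pvSumFrom S a := by
  fun_induction pvWhileA S a s c with
  | case1 a s c h ih => rw [pvSumFrom, dif_pos h]; rw [ih]; ring
  | case2 a s c h => rw [pvSumFrom, dif_neg h]; simp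

-- the max over run sums started at elements a of l with a-1 ∉ S, floored at 0
def pvMst (S l : List Int) : Int :=
  l.foldr (fun a acc => if a - 1 ∈ S then acc else max (pvSumFrom S a) acc) 0

theorem pvMst_nil (S : List Int) : pvMst S [] = 0 := rfl

theorem pvMst_cons (S : List Int) (a : Int) (l : List Int) :
    pvMst S (a :: l) = if a - 1 ∈ S then pvMst S l else max (pvSumFrom S a) (pvMst S l) := rfl

theorem pvSumFrom_le_pvMst (S : List Int) {a : Int} {l : List Int}
    (h : a ∈ l) (hns : a - 1 ∉ S) : pvSumFrom S a ≤ pvMst S l := by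
  induction l with
  | nil => simp at h
  | cons b t ih =>
    rcases List.mem_cons.mp h with hb | ht
    · subst hb; rw [pvMst_cons, if_neg hns]; exact le_max_left _ _
    · have := ih ht
      rw [pvMst_cons]; split <;> omega

theorem pvMst_cons_mem (S : List Int) {a : Int} {l : List Int} (h : a ∈ l) :
    pvMst S (a :: l) = pvMst S l := by
  rw [pvMst_cons]
  split
  · rfl
  · exact max_eq_right (pvSumFrom_le_pvMst S h (by assumption))

theorem pvMst_dedup (S l : List Int) : pvMst S l.dedup = pvMst S l := by
  induction l with
  | nil => rfl
  | cons a t ih =>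
    by_cases h : a ∈ t
    · rw [List.dedup_cons_of_mem h, ih, pvMst_cons_mem S h]
    · rw [List.dedup_cons_of_notMem h, pvMst_cons, pvMst_cons, ih]

theorem pvMst_perm (S : List Int) {l₁ l₂ : List Int} (h : l₁.Perm l₂) :
    pvMst S l₁ = pvMst S l₂ := by
  induction h with
  | nil => rfl
  | cons x h ih => rw [pvMst_cons, pvMst_cons, ih]
  | swap x y l =>
    rw [pvMst_cons, pvMst_cons, pvMst_cons, pvMst_cons]
    split_ifs <;> omega
  | trans h₁ h₂ ih₁ ih₂ => rw [ih₁, ih₂]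

theorem pvMst_ext (S : List Int) {l₁ l₂ : List Int} (h : ∀ x, x ∈ l₁ ↔ x ∈ l₂) :
    pvMst S l₁ = pvMst S l₂ := by
  rw [← pvMst_dedup S l₁, ← pvMst_dedup S l₂]
  exact pvMst_perm S ((List.perm_ext_iff_of_nodup l₁.nodup_dedup l₂.nodup_dedup).mpr
    (by intro a; rw [List.mem_dedup, List.mem_dedup]; exact h a))

theorem pvFoldA (S : List Int) (l : List Int) : ∀ (r c : Int), 0 ≤ r →
    (l.foldl (pvStepA S) (r, c)).1 = max r (pvMst S l) := by
  induction l with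
  | nil => intro r c hr; rw [pvMst_nil]; simp; omega
  | cons a t ih =>
    intro r c hr
    rw [List.foldl_cons, pvMst_cons]
    by_cases h : a - 1 ∈ S
    · rw [if_pos h]
      have : pvStepA S (r, c) a = (r, c) := by rw [pvStepA, if_pos h]
      rw [this, ih r c hr]
    · rw [if_neg h]
      have hst : pvStepA S (r, c) a = (max r (pvSumFrom S a), max c (pvWhileA S a 0 0).2) := by
        rw [pvStepA, if_neg h]
        have := pvWhileA_fst S a 0 0
        simp only []
        rw [this]; ring_nf
      rw [hst, ih _ _ (by omega)]
      omega

-- B's sweep with 'best' factored out: the max over closed runs plus the open run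
def pvMr (cur p : Int) : List Int → Int
  | [] => cur
  | v :: r => if v = p + 1 then pvMr (cur + v) v r else max cur (pvMr v v r)

theorem pvFoldB (t : List Int) : ∀ (best cur p : Int),
    max (t.foldl pvStepB (best, cur, some p)).1 (t.foldl pvStepB (best, cur, some p)).2.1 =
      max best (pvMr cur p t) := by
  induction t with
  | nil => intro best cur p; rfl
  | cons v r ih =>
    intro best cur p
    rw [List.foldl_cons]
    by_cases hv : v = p + 1
    · have : pvStepB (best, cur, some p) v = (best, cur + v, some v) := by
        simp [pvStepB, hv]
      rw [this, ih, pvMr, if_pos hv]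
    · have : pvStepB (best, cur, some p) v = (max best cur, v, some v) := by
        simp [pvStepB, hv]
      rw [this, ih, pvMr, if_neg hv]
      omega

theorem pvMr_eq (S : List Int) (t : List Int) : ∀ (cur p : Int),
    t.Pairwise (· < ·) → p ∈ S → (∀ x ∈ t, p < x) → (∀ x : Int, p < x → (x ∈ S ↔ x ∈ t)) →
    max 0 (pvMr cur p t) = max 0 (max (cur + pvSumFrom S (p + 1)) (pvMst S t)) := by
  induction t with
  | nil =>
    intro cur p _ _ _ hiff
    have hp1 : (p + 1 : Int) ∉ S := fun hs => by simpa using (hiff (p + 1) (by omega)).mp hs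
    rw [pvSumFrom, dif_neg hp1, pvMst_nil, pvMr]
    omega
  | cons v r ih =>
    intro cur p hpw hpS hlt hiff
    have hpv : p < v := hlt v (List.mem_cons_self)
    have hvS : v ∈ S := (hiff v hpv).mpr List.mem_cons_self
    have hrlt : ∀ x ∈ r, v < x := (List.pairwise_cons.mp hpw).1
    have hrpw : r.Pairwise (· < ·) := (List.pairwise_cons.mp hpw).2
    have hiff' : ∀ x : Int, v < x → (x ∈ S ↔ x ∈ r) := by
      intro x hx
      rw [hiff x (by omega), List.mem_cons]
      constructor
      · rintro (h | h)
        · omega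
        · exact h
      · exact fun h => Or.inr h
    have hsv : pvSumFrom S v = v + pvSumFrom S (v + 1) := by rw [pvSumFrom, dif_pos hvS]
    by_cases hv : v = p + 1
    · have h1 := ih (cur + v) v hrpw hvS hrlt hiff'
      have hs : pvSumFrom S (p + 1) = v + pvSumFrom S (v + 1) := by rw [← hv, hsv]
      have hm : pvMst S (v :: r) = pvMst S r := by
        rw [pvMst_cons, if_pos (by rw [hv]; simpa using hpS)]
      rw [pvMr, if_pos hv, hm, hs, h1]
      omega
    · have hv' : p + 1 < v := by omega
      have h1 := ih v v hrpw hvS hrlt hiff'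
      have hp1 : (p + 1 : Int) ∉ S := by
        intro hs
        rcases List.mem_cons.mp ((hiff _ (by omega)).mp hs) with h | h
        · omega
        · exact absurd (hrlt _ h) (by omega)
      have hv1 : (v - 1 : Int) ∉ S := by
        intro hs
        rcases List.mem_cons.mp ((hiff _ (by omega)).mp hs) with h | h
        · omega
        · exact absurd (hrlt _ h) (by omega)
      have hs0 : pvSumFrom S (p + 1) = 0 := by rw [pvSumFrom, dif_neg hp1]
      have hm : pvMst S (v :: r) = max (pvSumFrom S v) (pvMst S r) := by
        rw [pvMst_cons, if_neg hv1]
      rw [pvMr, if_neg hv, hm, hs0, hsv]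
      omega

theorem pvSolveA (arr : List Int) :
    solve arr = PySem.Int.mod (max 0 (pvMst (PySem.Set.ofList arr) arr)) (10 ^ 9 + 7) := by
  unfold solve
  simp only []
  rw [pvFoldA (PySem.Set.ofList arr) arr 0 0 le_rfl]

-- ===== VERDICT (by name: the statement is the Claim_ definition above) =====
theorem solve_spec : Claim_equal_solve := by
  intro arr _
  unfold Spec_solve
  rw [pvSolveA]
  unfold solve_alt
  simp only []
  rcases hu : PySem.List.sorted (PySem.Set.ofList arr) (fun x => x) false with _ | ⟨v, r⟩
  · have hS : PySem.Set.ofList arr = [] := (PySem.List.sorted_eq_nil_iff _ _ _).mp hu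
    have harr : arr = [] := by
      cases arr with
      | nil => rfl
      | cons a t =>
        exact absurd ((PySem.Set.mem_ofList (a :: t) a).mpr List.mem_cons_self)
          (by rw [hS]; simp)
    subst harr
    rfl
  · -- set-level facts about the sorted unique list v :: r
    have hmem : ∀ x : Int, x ∈ PySem.Set.ofList arr ↔ x ∈ v :: r := by
      intro x
      rw [← hu, PySem.List.mem_sorted]
    have hpw : (v :: r).Pairwise (fun a b : Int => a < b) := by
      rw [← hu]; exact PySem.List.sorted_ofList_pairwise_lt arr
    have hrlt : ∀ x ∈ r, v < x := (List.pairwise_cons.mp hpw).1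
    have hrpw : r.Pairwise (fun a b : Int => a < b) := (List.pairwise_cons.mp hpw).2
    have hvS : v ∈ PySem.Set.ofList arr := (hmem v).mpr List.mem_cons_self
    have hiff : ∀ x : Int, v < x → (x ∈ PySem.Set.ofList arr ↔ x ∈ r) := by
      intro x hx
      rw [hmem x, List.mem_cons]
      constructor
      · rintro (h | h)
        · omega
        · exact h
      · exact fun h => Or.inr h
    have hv1 : (v - 1 : Int) ∉ PySem.Set.ofList arr := by
      intro hs
      have := PySem.List.key_head_sorted_le _ _ hu _ hs
      simp only [] at this
      omega
    have hstep : pvStepB (0, 0, none) v = (0, v, some v) := by simp [pvStepB]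
    rw [List.foldl_cons, hstep, pvFoldB r 0 v v,
      pvMr_eq (PySem.Set.ofList arr) r v v hrpw hvS hrlt hiff]
    have hsv : pvSumFrom (PySem.Set.ofList arr) v = v + pvSumFrom (PySem.Set.ofList arr) (v + 1) := by
      rw [pvSumFrom, dif_pos hvS]
    have hm : pvMst (PySem.Set.ofList arr) (v :: r) =
        max (pvSumFrom (PySem.Set.ofList arr) v) (pvMst (PySem.Set.ofList arr) r) := by
      rw [pvMst_cons, if_neg hv1]
    have hext : pvMst (PySem.Set.ofList arr) arr = pvMst (PySem.Set.ofList arr) (v :: r) :=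
      pvMst_ext _ (fun x => by rw [← hmem x, PySem.Set.mem_ofList])
    rw [hext, hm, hsv]
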